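-- pv_equiv track=rewrite | github.com/pypi-data/pypi-mirror-359 | packages/wf2wf/wf2wf-1.0.0-py3-none-any.whl/wf2wf/exporters/wdl.py | _convert_ir_type_to_wdl
-- ===== SOURCE A (Python) =====
-- def _convert_ir_type_to_wdl(ir_type: str) -> str:
--     """Convert IR type to WDL type."""
--
--     # Handle union types (remove from IR type)
--     if isinstance(ir_type, dict):
--         # Complex type spec - use string representation
--         ir_type = str(ir_type)
--
--     ir_type = str(ir_type)
--
--     # Basic type mapping
--     type_mapping = {
--         "string": "String",
--         "int": "Int",
--         "float": "Float",
--         "boolean": "Boolean",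
--         "File": "File",
--         "Directory": "Directory",
--     }
--
--     # Handle optional types (type?)
--     if ir_type.endswith("?"):
--         base_type = ir_type[:-1]
--         mapped_type = type_mapping.get(base_type, base_type)
--         return f"{mapped_type}?"
--
--     # Handle array types
--     if ir_type.startswith("array<") and ir_type.endswith(">"):
--         item_type = ir_type[6:-1]  # Remove 'array<' and '>'
--         mapped_item_type = _convert_ir_type_to_wdl(item_type)
--         return f"Array[{mapped_item_type}]"
--
--     return type_mapping.get(ir_type, "String")
-- ===== SOURCE B (Python) =====
-- def _convert_ir_type_to_wdl(ir_type: str) -> str: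
--     """Convert IR type to WDL type (iterative: peel nested array layers, then resolve)."""
--     if isinstance(ir_type, dict):
--         ir_type = str(ir_type)
--     ir_type = str(ir_type)
--
--     type_mapping = {
--         "string": "String",
--         "int": "Int",
--         "float": "Float",
--         "boolean": "Boolean",
--         "File": "File",
--         "Directory": "Directory",
--     }
--
--     # Peel 'array<...>' layers iteratively, stopping if a layer is optional.
--     depth = 0
--     s = ir_type
--     while (not s.endswith("?")) and s.startswith("array<") and s.endswith(">"):
--         s = s[6:-1]
--         depth += 1
--
--     # Resolve the innermost type.
--     if s.endswith("?"):
--         base = s[:-1]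
--         core = type_mapping.get(base, base) + "?"
--     else:
--         core = type_mapping.get(s, "String")
--
--     # Re-wrap the counted array layers.
--     for _ in range(depth):
--         core = f"Array[{core}]"
--     return core
-- ===== Notes on version B (the rewrite author's own statement) =====
-- stated objective: alternative
-- what changed: Replaces A's per-level recursion on nested array types with an iterative peel loop counting the nesting depth, a single innermost-type resolution, and one re-wrap pass adding the WDL array wrapper depth times.
import Mathlib
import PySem

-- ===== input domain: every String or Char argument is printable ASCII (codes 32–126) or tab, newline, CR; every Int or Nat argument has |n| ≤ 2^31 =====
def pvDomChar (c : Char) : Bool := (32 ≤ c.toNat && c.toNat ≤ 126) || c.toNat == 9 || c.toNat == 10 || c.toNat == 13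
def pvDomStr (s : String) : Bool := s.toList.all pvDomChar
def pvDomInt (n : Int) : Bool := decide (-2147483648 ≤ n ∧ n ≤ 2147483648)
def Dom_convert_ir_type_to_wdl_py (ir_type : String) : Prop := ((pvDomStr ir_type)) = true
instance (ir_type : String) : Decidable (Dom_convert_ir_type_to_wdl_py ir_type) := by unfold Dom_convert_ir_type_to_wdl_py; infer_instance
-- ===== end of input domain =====

-- B replaces A's per-layer recursion on 'array<...>' by an iterative peel loop with a depth
-- counter plus a single re-wrap pass (alternative decomposition, same cost).


-- ===== PORT A =====
-- the type_mapping dict literal (shared by both ports, as in both Pythons)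
def wdlTypeMapping : PySem.Dict (List Char) (List Char) :=
  PySem.Dict.ofList [("string".toList, "String".toList), ("int".toList, "Int".toList),
    ("float".toList, "Float".toList), ("boolean".toList, "Boolean".toList),
    ("File".toList, "File".toList), ("Directory".toList, "Directory".toList)]

-- the recursive branch of A shortens the string by 7 ('array<' + '>')
theorem wdlSliceLen (cs : List Char)
    (h : PySem.Chars.startswith cs "array<".toList = true) :
    (PySem.Chars.slice cs (some 6) (some (-1))).length < cs.length := by
  have h6 : 6 ≤ cs.length := by
    have := ((PySem.Chars.startswith_iff cs "array<".toList).mp h).length_le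
    simpa using this
  simp only [PySem.Chars.slice_eq_listSlice, PySem.List.length_slice]
  have h1 : PySem.List.clampIdx cs.length (-1) = cs.length - 1 :=
    PySem.List.clampIdx_neg_one cs.length
  have h2 : PySem.List.clampIdx cs.length 6 = min 6 cs.length := by
    have := PySem.List.clampIdx_natCast cs.length 6
    simpa using this
  omega

-- literal port of A (over List Char; the String wrapper below)
def convWdlA (cs : List Char) : List Char :=
  if PySem.Chars.endswith cs "?".toList then
    let base := PySem.Chars.slice cs none (some (-1))
    PySem.Dict.getD wdlTypeMapping base base ++ "?".toList
  else if h : PySem.Chars.startswith cs "array<".toList = true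
              ∧ PySem.Chars.endswith cs ">".toList = true then
    "Array[".toList ++ convWdlA (PySem.Chars.slice cs (some 6) (some (-1))) ++ "]".toList
  else
    PySem.Dict.getD wdlTypeMapping cs "String".toList
termination_by cs.length
decreasing_by exact wdlSliceLen cs h.1

def convert_ir_type_to_wdl_py (ir_type : String) : String :=
  String.ofList (convWdlA ir_type.toList)

-- ===== PORT B =====
-- B's while loop: peel 'array<...>' layers, counting them; stops at an optional layer
def convWdlPeel (cs : List Char) : Nat × List Char :=
  if h : (¬ PySem.Chars.endswith cs "?".toList = true)
         ∧ PySem.Chars.startswith cs "array<".toList = true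
         ∧ PySem.Chars.endswith cs ">".toList = true then
    let p := convWdlPeel (PySem.Chars.slice cs (some 6) (some (-1)))
    (p.1 + 1, p.2)
  else (0, cs)
termination_by cs.length
decreasing_by exact wdlSliceLen cs h.2.1

-- B's innermost-type resolution
def convWdlCore (cs : List Char) : List Char :=
  if PySem.Chars.endswith cs "?".toList then
    let base := PySem.Chars.slice cs none (some (-1))
    PySem.Dict.getD wdlTypeMapping base base ++ "?".toList
  else
    PySem.Dict.getD wdlTypeMapping cs "String".toList

def convert_ir_type_to_wdl_py_alt (ir_type : String) : String :=
  let p := convWdlPeel ir_type.toList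
  let core := convWdlCore p.2
  -- for _ in range(depth): core = "Array[" + core + "]"
  String.ofList ((PySem.List.pyRange 0 (p.1 : Int) 1).foldl
    (fun c _ => "Array[".toList ++ c ++ "]".toList) core)

-- ===== PRECONDITION & SPEC =====
def Spec_convert_ir_type_to_wdl_py (ir_type : String) (out : String) : Prop := out = convert_ir_type_to_wdl_py_alt ir_type
instance (ir_type : String) (out : String) : Decidable (Spec_convert_ir_type_to_wdl_py ir_type out) := by unfold Spec_convert_ir_type_to_wdl_py; infer_instance

-- ===== CLAIM (what is proved, stated in full; the proofs are below) =====
def Claim_equal_convert_ir_type_to_wdl_py : Prop := ∀ (ir_type : String), Dom_convert_ir_type_to_wdl_py ir_type → Spec_convert_ir_type_to_wdl_py ir_type (convert_ir_type_to_wdl_py ir_type)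

-- ===== LEMMAS AND PROOFS =====

def convWdlWrap (n : Nat) (c : List Char) : List Char :=
  (PySem.List.pyRange 0 (n : Int) 1).foldl (fun c _ => "Array[".toList ++ c ++ "]".toList) c

theorem convWdlWrap_succ (n : Nat) (c : List Char) :
    convWdlWrap (n + 1) c = "Array[".toList ++ convWdlWrap n c ++ "]".toList := by
  unfold convWdlWrap
  have h1 : ((n + 1 : Nat) : Int) = (n : Int) + 1 := by push_cast; ring
  rw [h1, PySem.List.pyRange_one_append 0 (n : Int) ((n : Int) + 1) (by omega) (by omega),
      PySem.List.pyRange_one_cons (by omega : (n : Int) < (n : Int) + 1)]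
  simp [List.foldl_append, PySem.List.pyRange]

theorem convWdlA_eq (cs : List Char) :
    convWdlA cs = convWdlWrap (convWdlPeel cs).1 (convWdlCore (convWdlPeel cs).2) := by
  by_cases hq : PySem.Chars.endswith cs "?".toList = true
  · have hq' : PySem.Chars.endswith cs ['?'] = true := by simpa using hq
    have hpeel : convWdlPeel cs = (0, cs) := by
      rw [convWdlPeel, dif_neg (fun hc => hc.1 hq)]
    rw [convWdlA, if_pos hq, hpeel]
    simp [convWdlCore, hq', convWdlWrap, PySem.List.pyRange]
  · by_cases ha : PySem.Chars.startswith cs "array<".toList = true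
              ∧ PySem.Chars.endswith cs ">".toList = true
    · have ih := convWdlA_eq (PySem.Chars.slice cs (some 6) (some (-1)))
      have hpeel : convWdlPeel cs =
          ((convWdlPeel (PySem.Chars.slice cs (some 6) (some (-1)))).1 + 1,
           (convWdlPeel (PySem.Chars.slice cs (some 6) (some (-1)))).2) := by
        rw [convWdlPeel, dif_pos ⟨hq, ha.1, ha.2⟩]
      rw [convWdlA, if_neg hq, dif_pos ha, hpeel, ih]
      exact (convWdlWrap_succ _ _).symm
    · have hq' : PySem.Chars.endswith cs ['?'] = false := by simpa using hq
      have hpeel : convWdlPeel cs = (0, cs) := by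
        rw [convWdlPeel, dif_neg (by tauto)]
      rw [convWdlA, if_neg hq, dif_neg ha, hpeel]
      simp [convWdlCore, hq', convWdlWrap, PySem.List.pyRange]
termination_by cs.length
decreasing_by exact wdlSliceLen cs ha.1

-- ===== VERDICT (by name: the statement is the Claim_ definition above) =====
theorem convert_ir_type_to_wdl_py_spec : Claim_equal_convert_ir_type_to_wdl_py := by
  intro s _
  unfold Spec_convert_ir_type_to_wdl_py convert_ir_type_to_wdl_py convert_ir_type_to_wdl_py_alt
  rw [convWdlA_eq]
  rfl
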